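-- pv_equiv track=rewrite | github.com/mikulash/Ant-colony-optimization-for-TSP | templates/python_template/solver.py | createPheromoneMatrix
-- ===== SOURCE A (Python) =====
-- def createPheromoneMatrix(distanceMatrix):
--     pheromoneMatrix = []
--     for i in range(len(distanceMatrix)):
--         row = []
--         for j in range(len(distanceMatrix)):
--             if i == j:
--                 row.append(0)
--             else:
--                 row.append(1)
--         pheromoneMatrix.append(row)
--     return pheromoneMatrix
-- ===== SOURCE B (Python) =====
-- def createPheromoneMatrix(distanceMatrix):
--     n = len(distanceMatrix)
--     base = [0] + [1] * (n - 1)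
--     return [base[n - i:] + base[:n - i] for i in range(n)]
-- ===== Notes on version B (the rewrite author's own statement) =====
-- stated objective: alternative
-- what changed: B computes no cell with an i==j test: it builds the single base row [0,1,...,1] once and emits row i as the rotation of that row by i positions via two slices, so the matrix is n rotations of one precomputed row.
import Mathlib
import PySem

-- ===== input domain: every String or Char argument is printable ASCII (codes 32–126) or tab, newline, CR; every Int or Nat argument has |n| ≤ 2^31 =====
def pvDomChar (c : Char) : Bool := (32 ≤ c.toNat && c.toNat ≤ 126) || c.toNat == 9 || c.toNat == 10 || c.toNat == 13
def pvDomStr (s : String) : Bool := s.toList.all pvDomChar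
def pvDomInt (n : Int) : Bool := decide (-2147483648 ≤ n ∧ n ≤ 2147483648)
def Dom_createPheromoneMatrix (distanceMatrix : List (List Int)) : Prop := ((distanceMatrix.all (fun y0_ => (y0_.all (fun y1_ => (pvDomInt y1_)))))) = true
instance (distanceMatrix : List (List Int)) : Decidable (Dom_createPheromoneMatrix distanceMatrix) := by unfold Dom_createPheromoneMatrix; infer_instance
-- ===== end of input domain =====

-- B builds the base row [0,1,...,1] once and emits row i as its rotation by i via two
-- slices, instead of A's per-cell i==j test inside nested loops (objective: alternative).

-- ===== PORT A =====
-- literal transliteration: nested range loops appending 0 on the diagonal, 1 elsewhere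
def createPheromoneMatrix (distanceMatrix : List (List Int)) : List (List Int) :=
  (PySem.List.pyRange 0 distanceMatrix.length 1).foldl
    (fun pheromoneMatrix i =>
      pheromoneMatrix ++
        [(PySem.List.pyRange 0 distanceMatrix.length 1).foldl
          (fun row j => row ++ [if i == j then (0 : Int) else 1]) []])
    []

-- ===== PORT B =====
-- literal transliteration of Source B: base = [0] + [1]*(n-1); row i = base[n-i:] + base[:n-i]
def createPheromoneMatrix_alt (distanceMatrix : List (List Int)) : List (List Int) :=
  let n := distanceMatrix.length
  let base : List Int := [0] ++ List.replicate (n - 1) 1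
  (PySem.List.pyRange 0 n 1).map (fun i =>
    PySem.List.slice base (some ((n : Int) - i)) none ++
    PySem.List.slice base none (some ((n : Int) - i)))

-- ===== PRECONDITION & SPEC =====
def Spec_createPheromoneMatrix (distanceMatrix : List (List Int)) (out : List (List Int)) : Prop := out = createPheromoneMatrix_alt distanceMatrix
instance (distanceMatrix : List (List Int)) (out : List (List Int)) : Decidable (Spec_createPheromoneMatrix distanceMatrix out) := by unfold Spec_createPheromoneMatrix; infer_instance

-- ===== CLAIM (what is proved, stated in full; the proofs are below) =====
def Claim_equal_createPheromoneMatrix : Prop := ∀ (distanceMatrix : List (List Int)), Dom_createPheromoneMatrix distanceMatrix → Spec_createPheromoneMatrix distanceMatrix (createPheromoneMatrix distanceMatrix)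

-- ===== LEMMAS AND PROOFS =====

/-- The common value of both ports as a closed description. -/
def pvTarget (n : Nat) : List (List Int) :=
  (List.range n).map (fun i => (List.range n).map (fun j => if i = j then 0 else 1))

/-- snoc-fold is map. -/
theorem pv_foldl_snoc {α β : Type} (f : α → β) (l : List α) (init : List β) :
    l.foldl (fun acc i => acc ++ [f i]) init = init ++ l.map f := by
  induction l generalizing init with
  | nil => simp
  | cons a t ih => simp [List.foldl_cons, ih]

theorem pvA_eq (d : List (List Int)) : createPheromoneMatrix d = pvTarget d.length := by
  unfold createPheromoneMatrix pvTarget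
  rw [pv_foldl_snoc]
  rw [PySem.List.pyRange_zero_natCast]
  simp only [List.map_map, List.nil_append, Function.comp_def]
  apply List.map_congr_left
  intro i _
  rw [pv_foldl_snoc]
  simp only [List.map_map, List.nil_append, Function.comp_def]
  apply List.map_congr_left
  intro j _
  simp

/-- B's base row, indexed: 0 at position 0, 1 elsewhere. -/
theorem pv_base_getElem (n k : Nat) (h : k < ((0 : Int) :: List.replicate (n - 1) (1 : Int)).length) :
    ((0 : Int) :: List.replicate (n - 1) (1 : Int))[k] = if k = 0 then 0 else 1 := by
  cases k with
  | zero => simp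
  | succ k => simp at h ⊢

/-- Row i of B: rotating the base row by i gives the i-th row of the target. -/
theorem pv_row (n i : Nat) (hi : i < n) :
    (((0 : Int) :: List.replicate (n - 1) 1).drop (n - i)) ++
      (((0 : Int) :: List.replicate (n - 1) 1).take (n - i))
    = (List.range n).map (fun j => if i = j then 0 else 1) := by
  have hlen : ((0 : Int) :: List.replicate (n - 1) (1 : Int)).length = n := by
    simp; omega
  apply List.ext_getElem
  · simp only [List.length_append, List.length_drop, List.length_take, List.length_map,
      List.length_range, hlen]
    omega
  · intro j h1 h2
    simp only [List.length_append, List.length_drop, List.length_take, hlen] at h1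
    simp only [List.getElem_map, List.getElem_range]
    by_cases hj : j < ((((0 : Int) :: List.replicate (n - 1) 1).drop (n - i))).length
    · rw [List.getElem_append_left hj]
      simp only [List.length_drop, hlen] at hj
      rw [List.getElem_drop]
      rw [pv_base_getElem n]
      have : ¬ (n - i + j = 0) := by omega
      rw [if_neg this]
      have : ¬ (i = j) := by omega
      rw [if_neg this]
    · rw [List.getElem_append_right (by omega)]
      simp only [List.length_drop, hlen] at hj ⊢
      rw [List.getElem_take]
      rw [pv_base_getElem n]
      have hj' : i ≤ j := by omega
      by_cases he : j = i
      · rw [if_pos (by omega : j - (n - (n - i)) = 0), if_pos (by omega : i = j)]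
      · have h0 : ¬ (j - (n - (n - i)) = 0) := by omega
        rw [if_neg h0]
        have : ¬ (i = j) := fun hh => he hh.symm
        rw [if_neg this]

theorem pvB_eq (d : List (List Int)) : createPheromoneMatrix_alt d = pvTarget d.length := by
  unfold createPheromoneMatrix_alt pvTarget
  simp only [PySem.List.pyRange_zero_natCast, List.map_map, Function.comp_def]
  apply List.map_congr_left
  intro i hi
  have hi' : i < d.length := List.mem_range.mp hi
  have hcast : ((d.length : Int) - (i : Int)) = ((d.length - i : Nat) : Int) := by
    push_cast [Nat.cast_sub (le_of_lt hi')]; ring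
  rw [hcast, PySem.List.slice_from_natCast, PySem.List.slice_to_natCast]
  simpa using pv_row d.length i hi'

-- ===== VERDICT (by name: the statement is the Claim_ definition above) =====
theorem createPheromoneMatrix_spec : Claim_equal_createPheromoneMatrix := by
  intro d _
  unfold Spec_createPheromoneMatrix
  rw [pvA_eq, pvB_eq]
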